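-- pv_equiv track=rewrite | github.com/ashddev/aoc-2025 | aoc/day03/part2.py | solve
-- ===== SOURCE A (Python) =====
-- def solve(input: str):
--     transform = lambda x: list(map(int, list(x)))
--     banks = list(map(transform, input.strip().split("\n")))
--     total_joltage = 0
--     for bank in banks:
--         batteries = [0] * 12
--         for position, joltage in enumerate(bank):
--             for i, recorded in enumerate(batteries):
--                 if joltage > recorded and position < len(bank) - (11-i):
--                     batteries[i] = joltage
--                     for reset in range(i+1, 12):
--                         batteries[reset] = 0
--                     break
--         total_joltage += int("".join(map(str, batteries)))
--     return total_joltage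
-- ===== SOURCE B (Python) =====
-- def solve(input: str):
--     total_joltage = 0
--     for line in input.strip().split("\n"):
--         bank = [int(c) for c in line]
--         n = len(bank)
--         # monotonic stack: keep the best 12-digit subsequence seen so far
--         stack = []
--         for position, joltage in enumerate(bank):
--             while stack and stack[-1] < joltage and len(stack) + (n - position) > 12:
--                 stack.pop()
--             if len(stack) < 12:
--                 stack.append(joltage)
--         digits = [0] * (12 - len(stack)) + stack
--         total_joltage += int("".join(map(str, digits)))
--     return total_joltage
-- ===== Notes on version B (the rewrite author's own statement) =====
-- stated objective: alternative
-- what changed: A keeps a fixed 12-slot battery array and, for each digit, rescans it for the first improvable slot and zeroes everything after it; B instead builds each bank's best 12-digit subsequence with a monotonic stack (pop while the top is smaller and the remaining digits can still refill to 12, then push), left-padding the stack with zeros, which also covers banks of fewer than 12 digits.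
import Mathlib
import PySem

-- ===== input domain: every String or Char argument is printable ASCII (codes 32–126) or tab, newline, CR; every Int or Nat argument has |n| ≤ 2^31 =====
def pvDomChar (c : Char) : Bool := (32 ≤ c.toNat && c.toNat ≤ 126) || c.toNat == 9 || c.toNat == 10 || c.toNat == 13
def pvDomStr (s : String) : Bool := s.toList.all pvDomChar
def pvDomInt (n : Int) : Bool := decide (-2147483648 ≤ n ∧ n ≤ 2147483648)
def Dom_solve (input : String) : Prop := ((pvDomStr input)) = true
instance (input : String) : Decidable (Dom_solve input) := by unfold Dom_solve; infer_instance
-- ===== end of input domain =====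

-- B replaces A's per-digit rescan of a fixed 12-slot battery array by a per-bank monotonic stack
-- (alternative algorithm, same cost class); return values proved equal on all inputs in Pre_solve.

-- ===== PORT A =====
-- int(x): Python raises ValueError on non-digit one-char strings; such inputs are outside Pre_solve
def pyIntA (x : String) : Int := (PySem.Int.ofStr? x).getD 0

-- transform = lambda x: list(map(int, list(x)))
def transformA (x : String) : List Int := x.toList.map (fun c => pyIntA (String.singleton c))

-- inner loop 'for i, recorded in enumerate(batteries): if …: batteries[i] = joltage; reset i+1..11; break'
def scanA (nb pos joltage : Int) : Int → List Int → List Int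
  | _, [] => []
  | i, recorded :: rest =>
    if joltage > recorded ∧ pos < nb - (11 - i) then
      joltage :: List.replicate rest.length 0
    else recorded :: scanA nb pos joltage (i + 1) rest

-- 'for position, joltage in enumerate(bank): …' starting from batteries = [0]*12
def bankLoopA (bank : List Int) : List Int :=
  (PySem.List.enumerate bank).foldl
    (fun batteries pj => scanA (PySem.List.len bank) pj.1 pj.2 0 batteries)
    (List.replicate 12 0)

-- int("".join(map(str, batteries)))
def renderA (batteries : List Int) : Int :=
  (PySem.Int.ofStr? (PySem.Str.join "" (batteries.map PySem.Int.toStr))).getD 0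

def solve (input : String) : Int :=
  (((PySem.Str.split? (PySem.Str.strip input) "\n").getD []).map transformA).foldl
    (fun total bank => total + renderA (bankLoopA bank)) 0

-- ===== PORT B =====
def pyIntB (x : String) : Int := (PySem.Int.ofStr? x).getD 0

-- bank = [int(c) for c in line]
def transformB (x : String) : List Int := x.toList.map (fun c => pyIntB (String.singleton c))

-- the stack is kept TOP-FIRST: Python's append/pop at the END of its list are cons/tail at the
-- head here, and the stack is reversed when the final digit list is assembled
def popLoopB (joltage afford : Int) : List Int → List Int
  | [] => []
  | t :: rest =>
    if t < joltage ∧ ((t :: rest).length : Int) + afford > 12 then popLoopB joltage afford rest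
    else t :: rest

def stepB (nb : Int) (stack : List Int) (pj : Int × Int) : List Int :=
  let s1 := popLoopB pj.2 (nb - pj.1) stack
  if s1.length < 12 then pj.2 :: s1 else s1

-- per-bank monotonic stack, then digits = [0]*(12-len(stack)) + stack
def bankLoopB (bank : List Int) : List Int :=
  let stack := (PySem.List.enumerate bank).foldl (stepB (PySem.List.len bank)) []
  List.replicate (12 - stack.length) 0 ++ stack.reverse

def renderB (digits : List Int) : Int :=
  (PySem.Int.ofStr? (PySem.Str.join "" (digits.map PySem.Int.toStr))).getD 0

def solve_alt (input : String) : Int :=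
  ((PySem.Str.split? (PySem.Str.strip input) "\n").getD []).foldl
    (fun total line => total + renderB (bankLoopB (transformB line))) 0

-- ===== PRECONDITION & SPEC =====
-- Pre_solve: every line of the stripped input consists of digit characters only; on any other
-- character Python's int() raises ValueError in both A and B, so those inputs are excluded.
def Pre_solve (input : String) : Prop :=
  ((PySem.Str.strip input).toList.all
    (fun c => c == '\n' || PySem.Chars.isdigit c)) = true

instance (input : String) : Decidable (Pre_solve input) := by unfold Pre_solve; infer_instance

def pvWitness_solve : String := "91\n2"

def Spec_solve (input : String) (out : Int) : Prop := out = solve_alt input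
instance (input : String) (out : Int) : Decidable (Spec_solve input out) := by unfold Spec_solve; infer_instance

-- ===== CLAIM (what is proved, stated in full; the proofs are below) =====
def Claim_equal_solve : Prop := ∀ (input : String), Dom_solve input → Pre_solve input → Spec_solve input (solve input)

-- ===== LEMMAS AND PROOFS =====

-- int(x) of any one-character string is a nonnegative integer (int("-") raises, ported as 0)
theorem pyIntA_nonneg (c : Char) : 0 ≤ pyIntA (String.singleton c) := by
  by_cases hcm : c = '-'
  · subst hcm
    decide
  · unfold pyIntA
    cases hk : PySem.Int.ofStr? (String.singleton c) with
    | none => simp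
    | some k =>
      simp only [Option.getD_some]
      unfold PySem.Int.ofStr? at hk
      simp only [String.toList_singleton] at hk
      unfold PySem.Int.ofChars? at hk
      have hcs : (List.dropWhile PySem.Int.isIntSpace
            (List.dropWhile PySem.Int.isIntSpace [c]).reverse).reverse = [] ∨
          (List.dropWhile PySem.Int.isIntSpace
            (List.dropWhile PySem.Int.isIntSpace [c]).reverse).reverse = [c] := by
        by_cases hsp : PySem.Int.isIntSpace c = true
        · left
          simp [List.dropWhile_cons, hsp]
        · right
          simp only [Bool.not_eq_true] at hsp
          simp [List.dropWhile_cons, hsp]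
      dsimp only at hk
      split at hk
      next ds heq =>
        exfalso
        rcases hcs with hcs | hcs
        · rw [hcs] at heq
          simp at heq
        · rw [hcs] at heq
          exact hcm ((List.cons.injEq _ _ _ _).mp heq |>.1)
      next ds heq =>
        rw [Option.map_eq_some_iff] at hk
        obtain ⟨a, ha, rfl⟩ := hk
        simp only [Option.pure_def, Option.bind_eq_bind, Option.bind_eq_some_iff] at ha
        obtain ⟨b, hb, hbp⟩ := ha
        obtain rfl : (b : Int) = a := by simpa using hbp
        exact Int.natCast_nonneg b
      next =>
        rw [Option.map_eq_some_iff] at hk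
        obtain ⟨a, ha, rfl⟩ := hk
        simp only [Option.pure_def, Option.bind_eq_bind, Option.bind_eq_some_iff] at ha
        obtain ⟨b, hb, hbp⟩ := ha
        obtain rfl : (b : Int) = a := by simpa using hbp
        exact Int.natCast_nonneg b

-- A's inner scan walks past a region where no slot fires
theorem scanA_skip (nb pos d : Int) (ys zs : List Int) (i : Int)
    (h : ∀ (j : Nat) (hj : j < ys.length), ¬(d > ys[j] ∧ pos < nb - (11 - (i + (j : Int))))) :
    scanA nb pos d i (ys ++ zs) = ys ++ scanA nb pos d (i + (ys.length : Int)) zs := by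
  induction ys generalizing i with
  | nil => simp
  | cons y ys ih =>
    have h0 := h 0 (by simp)
    simp only [List.cons_append, scanA]
    rw [if_neg (by simpa using h0)]
    rw [ih (i + 1) (fun j hj hcon => by
      apply h (j + 1) (by simpa using Nat.succ_lt_succ hj)
      refine ⟨by simpa using hcon.1, ?_⟩
      have := hcon.2
      push_cast at this ⊢
      omega)]
    simp only [List.length_cons]
    rw [show i + (((ys.length + 1 : Nat)) : Int) = i + 1 + (ys.length : Int) from by push_cast; ring]

-- if every element is ≥ d, the scan changes nothing
theorem scanA_ge (nb pos d : Int) (b : List Int) (i : Int) (h : ∀ x ∈ b, d ≤ x) :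
    scanA nb pos d i b = b := by
  induction b generalizing i with
  | nil => rfl
  | cons y ys ih =>
    simp only [scanA]
    rw [if_neg (by
      rintro ⟨h1, -⟩
      exact absurd (h y (by simp)) (by omega))]
    rw [ih (i + 1) (fun x hx => h x (by simp [hx]))]

-- when the slot at index i + |pre| is guaranteed to fire, the entries past it are irrelevant
theorem scanA_forced (nb pos d : Int) (pre : List Int) (r r' : Int) (tl tl' : List Int) (i : Int)
    (hlen : tl.length = tl'.length)
    (hr : d > r ∧ pos < nb - (11 - (i + (pre.length : Int))))
    (hr' : d > r' ∧ pos < nb - (11 - (i + (pre.length : Int)))) :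
    scanA nb pos d i (pre ++ r :: tl) = scanA nb pos d i (pre ++ r' :: tl') := by
  induction pre generalizing i with
  | nil =>
    simp only [List.nil_append, scanA]
    rw [if_pos (by simpa using hr), if_pos (by simpa using hr')]
    simp [hlen]
  | cons q pre ih =>
    simp only [List.cons_append, scanA]
    by_cases hq : d > q ∧ pos < nb - (11 - i)
    · rw [if_pos hq, if_pos hq]
      simp [hlen]
    · rw [if_neg hq, if_neg hq]
      congr 1
      refine ih (i + 1) ⟨hr.1, ?_⟩ ⟨hr'.1, ?_⟩
      · have := hr.2
        simp only [List.length_cons] at this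
        push_cast at this ⊢
        omega
      · have := hr'.2
        simp only [List.length_cons] at this
        push_cast at this ⊢
        omega

-- prefix monotonicity helpers for the stack invariant
theorem take_eq_take_take (st : List Int) (a b : Nat) (hab : a ≤ b) :
    st.take a = (st.take b).take a := by
  rw [List.take_take, Nat.min_eq_left hab]

theorem pairwise_take_mono (st : List Int) (a b : Nat) (hab : a ≤ b)
    (h : (st.take b).Pairwise (· ≤ ·)) : (st.take a).Pairwise (· ≤ ·) := by
  rw [take_eq_take_take st a b hab]
  exact h.sublist (List.take_sublist _ _)

theorem mem_take_mono (st : List Int) (a b : Nat) (hab : a ≤ b) (x : Int)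
    (hx : x ∈ st.take a) : x ∈ st.take b := by
  rw [take_eq_take_take st a b hab] at hx
  exact List.mem_of_mem_take hx

theorem getElem_mem_take (st : List Int) (k a : Nat) (hk : k < a) (hka : k < st.length) :
    st[k] ∈ st.take a := by
  have h1 : k < (st.take a).length := by simp; omega
  have h2 : (st.take a)[k]'h1 = st[k] := by
    rw [List.getElem_take]
  rw [← h2]
  exact List.getElem_mem h1

-- the 12-entry battery array that a (top-first) stack `st` represents at position p of a bank of n digits
def padA (n p : Nat) (st : List Int) : List Int :=
  List.replicate (12 - st.length - (n - p)) 0 ++ st.reverse ++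
    List.replicate (12 - (12 - st.length - (n - p)) - st.length) 0

-- a zero digit never fires a slot nor pops the stack
theorem step_zero (n p : Nat) (hpn : p < n) (st : List Int)
    (hlen : st.length ≤ 12) (hnn : ∀ x ∈ st, 0 ≤ x) :
    scanA (n : Int) (p : Int) 0 0 (padA n p st) =
      padA n (p + 1) (if st.length < 12 then (0 : Int) :: st else st) := by
  have hpad : scanA (n : Int) (p : Int) 0 0 (padA n p st) = padA n p st := by
    apply scanA_ge
    intro x hx
    unfold padA at hx
    simp only [List.mem_append, List.mem_replicate, List.mem_reverse] at hx
    rcases hx with (⟨-, rfl⟩ | hx) | ⟨-, rfl⟩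
    · exact le_refl 0
    · exact hnn x hx
    · exact le_refl 0
  rw [hpad]
  by_cases hL : st.length < 12
  · rw [if_pos hL]
    unfold padA
    rw [show 12 - ((0:Int) :: st).length - (n - (p + 1)) = 12 - st.length - (n - p) from by
          simp only [List.length_cons]; omega]
    rw [show 12 - (12 - st.length - (n - p)) - ((0:Int) :: st).length =
          12 - (12 - st.length - (n - p)) - st.length - 1 from by
          simp only [List.length_cons]; omega]
    rw [show 12 - (12 - st.length - (n - p)) - st.length =
          (12 - (12 - st.length - (n - p)) - st.length - 1) + 1 from by omega]
    rw [List.replicate_succ]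
    simp [List.append_assoc]
  · rw [if_neg hL]
    unfold padA
    rw [show 12 - st.length - (n - (p + 1)) = 0 from by omega,
        show 12 - st.length - (n - p) = 0 from by omega]

-- one step of A on the array equals one non-popping step of B on the stack
theorem step_nopop (n p : Nat) (hpn : p < n) (d : Int) (hd : 0 ≤ d) (st : List Int)
    (hlen : st.length ≤ 12) (hnn : ∀ x ∈ st, 0 ≤ x)
    (hF : ∀ x ∈ st.take (st.length + (n - p) - 12), d ≤ x) :
    scanA (n : Int) (p : Int) d 0 (padA n p st) =
      padA n (p + 1) (if st.length < 12 then d :: st else st) := by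
  by_cases hd0 : 0 < d
  case neg =>
    have hdz : d = 0 := by omega
    subst hdz
    exact step_zero n p hpn st hlen hnn
  have hys : padA n p st =
      (List.replicate (12 - st.length - (n - p)) 0 ++ st.reverse) ++
        List.replicate (12 - (12 - st.length - (n - p)) - st.length) 0 := by
    unfold padA
    simp [List.append_assoc]
  have hskip : ∀ (j : Nat)
      (hj : j < (List.replicate (12 - st.length - (n - p)) 0 ++ st.reverse).length),
      ¬(d > (List.replicate (12 - st.length - (n - p)) 0 ++ st.reverse)[j] ∧
        (p : Int) < (n : Int) - (11 - ((0 : Int) + (j : Int)))) := by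
    intro j hj
    rintro ⟨hgt, hpos⟩
    have hjlen : j < (12 - st.length - (n - p)) + st.length := by simpa using hj
    by_cases hjf : j < 12 - st.length - (n - p)
    · omega
    · push_neg at hjf
      have hjr : j - (12 - st.length - (n - p)) < st.reverse.length := by simp; omega
      have hel : (List.replicate (12 - st.length - (n - p)) 0 ++ st.reverse)[j] =
          st[st.length - 1 - (j - (12 - st.length - (n - p)))]'(by omega) := by
        rw [List.getElem_append_right (by simpa using hjf)]
        rw [List.getElem_reverse]
        congr 1
        simp
      have hmem : st[st.length - 1 - (j - (12 - st.length - (n - p)))]'(by omega) ∈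
          st.take (st.length + (n - p) - 12) :=
        getElem_mem_take st _ _ (by omega) (by omega)
      have := hF _ hmem
      rw [hel] at hgt
      omega
  rw [hys, scanA_skip _ _ _ _ _ _ hskip]
  simp only [List.length_append, List.length_replicate, List.length_reverse, zero_add]
  by_cases hL : st.length < 12
  · have hzpos : 1 ≤ 12 - (12 - st.length - (n - p)) - st.length := by omega
    rw [if_pos hL]
    rw [show 12 - (12 - st.length - (n - p)) - st.length =
          (12 - (12 - st.length - (n - p)) - st.length - 1) + 1 from by omega]
    rw [List.replicate_succ]
    simp only [scanA]
    rw [if_pos ⟨by omega, by push_cast; omega⟩]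
    unfold padA
    rw [show 12 - (d :: st).length - (n - (p + 1)) = 12 - st.length - (n - p) from by
          simp only [List.length_cons]; omega]
    rw [show 12 - (12 - st.length - (n - p)) - (d :: st).length =
          12 - (12 - st.length - (n - p)) - st.length - 1 from by
          simp only [List.length_cons]; omega]
    simp [List.append_assoc, List.length_replicate]
  · rw [if_neg hL]
    have hf0 : 12 - st.length - (n - p) = 0 := by omega
    have hz0 : 12 - (12 - st.length - (n - p)) - st.length = 0 := by omega
    rw [hz0]
    simp only [List.replicate_zero, scanA, List.append_nil]
    unfold padA
    rw [show 12 - st.length - (n - (p + 1)) = 0 from by omega,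
        show 12 - 0 - st.length = 0 from by omega]
    simp [hf0]

-- one step of A on the array equals one step of B on the stack, and B's invariant is preserved
theorem step_main (n p : Nat) (hpn : p < n) (d : Int) (hd : 0 ≤ d) (st : List Int) :
    st.length ≤ 12 → (∀ x ∈ st, 0 ≤ x) →
    (st.take (st.length + (n - p) - 12)).Pairwise (· ≤ ·) →
    (scanA (n : Int) (p : Int) d 0 (padA n p st) = padA n (p + 1) (stepB (n : Int) st ((p : Int), d)) ∧
      ((stepB (n : Int) st ((p : Int), d)).length ≤ 12 ∧
        (∀ x ∈ stepB (n : Int) st ((p : Int), d), 0 ≤ x) ∧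
        ((stepB (n : Int) st ((p : Int), d)).take
          ((stepB (n : Int) st ((p : Int), d)).length + (n - (p + 1)) - 12)).Pairwise (· ≤ ·))) := by
  induction st with
  | nil =>
    intro _ _ _
    have h1 := step_nopop n p hpn d hd [] (by simp) (by simp) (by simp)
    rw [if_pos (by simp)] at h1
    have hsteps : stepB (n : Int) [] ((p : Int), d) = [d] := by
      unfold stepB popLoopB
      simp
    rw [hsteps]
    refine ⟨h1, by simp, by simpa using hd, ?_⟩
    have hk : ∀ k : Nat, (List.take k [d]).Pairwise (· ≤ ·) := by
      intro k
      cases k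
      · simp
      · simp
    exact hk _
  | cons t rest ih =>
    intro hlen hnn hch
    have hLeq : (t :: rest).length = rest.length + 1 := by simp
    by_cases hpop : t < d ∧ (((t :: rest).length : Int)) + ((n : Int) - (p : Int)) > 12
    · -- B pops t; A's scan is forced to fire no later than t's slot, t's value irrelevant
      have hdt : t < d := hpop.1
      have htn : 0 ≤ t := hnn t (by simp)
      have hlc : 13 ≤ rest.length + 1 + (n - p) := by
        have := hpop.2
        simp only [List.length_cons] at this
        push_cast at this
        omega
      have hstepeq : stepB (n : Int) (t :: rest) ((p : Int), d) =
          stepB (n : Int) rest ((p : Int), d) := by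
        unfold stepB
        simp only [popLoopB]
        rw [if_pos hpop]
      have hlen' : rest.length ≤ 12 := by simp only [List.length_cons] at hlen; omega
      have hnn' : ∀ x ∈ rest, 0 ≤ x := fun x hx => hnn x (by simp [hx])
      have hch' : (rest.take (rest.length + (n - p) - 12)).Pairwise (· ≤ ·) := by
        have h1 := hch
        simp only [List.length_cons] at h1
        rw [show rest.length + 1 + (n - p) - 12 = (rest.length + (n - p) - 12) + 1 from by omega,
            List.take_succ_cons] at h1
        exact (List.pairwise_cons.mp h1).2
      have hA1 : padA n p (t :: rest) =
          rest.reverse ++ t :: List.replicate (12 - (t :: rest).length) 0 := by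
        unfold padA
        rw [show 12 - (t :: rest).length - (n - p) = 0 from by
              simp only [List.length_cons]; omega]
        rw [show 12 - 0 - (t :: rest).length = 12 - (t :: rest).length from by omega]
        simp [List.append_assoc]
      have hA2 : padA n p rest =
          rest.reverse ++ (0 : Int) :: List.replicate (12 - (t :: rest).length) 0 := by
        unfold padA
        rw [show 12 - rest.length - (n - p) = 0 from by omega]
        rw [show 12 - 0 - rest.length = (12 - (t :: rest).length) + 1 from by
              simp only [List.length_cons]; omega]
        rw [List.replicate_succ]
        simp [List.append_assoc]
      have hd1 : (0 : Int) < d := by omega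
      have hfeas : (p : Int) < (n : Int) - (11 - ((0 : Int) + ((rest.reverse.length : Nat) : Int))) := by
        simp only [List.length_reverse]
        push_cast
        omega
      have hforce : scanA (n : Int) (p : Int) d 0 (padA n p (t :: rest)) =
          scanA (n : Int) (p : Int) d 0 (padA n p rest) := by
        rw [hA1, hA2]
        exact scanA_forced _ _ _ rest.reverse t 0 _ _ 0 rfl ⟨hdt, hfeas⟩ ⟨hd1, hfeas⟩
      obtain ⟨heq', hl', hn', hc'⟩ := ih hlen' hnn' hch'
      rw [hstepeq]
      exact ⟨by rw [hforce]; exact heq', hl', hn', hc'⟩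
    · -- no pop: B pushes (if there is room), A fires at the first free slot (or nowhere)
      have hself : popLoopB d ((n : Int) - (p : Int)) (t :: rest) = t :: rest := by
        simp only [popLoopB]
        rw [if_neg hpop]
      have hsteps : stepB (n : Int) (t :: rest) ((p : Int), d) =
          if (t :: rest).length < 12 then d :: (t :: rest) else (t :: rest) := by
        unfold stepB
        simp only [hself]
      have hF : ∀ x ∈ (t :: rest).take ((t :: rest).length + (n - p) - 12), d ≤ x := by
        intro x hx
        by_cases hcase : (((t :: rest).length : Int)) + ((n : Int) - (p : Int)) > 12
        · have htd : ¬ t < d := fun hlt => hpop ⟨hlt, hcase⟩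
          have hcn : 13 ≤ (t :: rest).length + (n - p) := by
            push_cast at hcase
            omega
          rw [show (t :: rest).length + (n - p) - 12 =
                ((t :: rest).length + (n - p) - 13) + 1 from by omega,
              List.take_succ_cons] at hx
          rcases List.mem_cons.mp hx with rfl | hx'
          · omega
          · have h1 := hch
            rw [show (t :: rest).length + (n - p) - 12 =
                  ((t :: rest).length + (n - p) - 13) + 1 from by omega,
                List.take_succ_cons] at h1
            have h2 := (List.pairwise_cons.mp h1).1 x hx'
            omega
        · have hz : (t :: rest).length + (n - p) - 12 = 0 := by
            push_cast at hcase
            omega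
          rw [hz] at hx
          simp at hx
      refine ⟨?_, ?_, ?_, ?_⟩
      · rw [hsteps]
        exact step_nopop n p hpn d hd (t :: rest) hlen hnn hF
      · rw [hsteps]
        split_ifs with h
        · simp only [List.length_cons] at h ⊢
          omega
        · exact hlen
      · rw [hsteps]
        split_ifs with h
        · intro x hx
          rcases List.mem_cons.mp hx with rfl | hx'
          · exact hd
          · exact hnn x hx'
        · exact hnn
      · rw [hsteps]
        by_cases hL : (t :: rest).length < 12
        · rw [if_pos hL]
          rw [show (d :: t :: rest).length + (n - (p + 1)) - 12 =
                (t :: rest).length + (n - p) - 12 from by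
                simp only [List.length_cons]; omega]
          rcases Nat.eq_zero_or_pos ((t :: rest).length + (n - p) - 12) with h0 | h1
          · rw [h0]
            simp
          · rw [show (t :: rest).length + (n - p) - 12 =
                  ((t :: rest).length + (n - p) - 13) + 1 from by omega,
                List.take_succ_cons]
            refine List.pairwise_cons.mpr ⟨?_, ?_⟩
            · intro y hy
              exact hF y (mem_take_mono _ _ _ (by omega) y hy)
            · exact pairwise_take_mono _ _ _ (by omega) hch
        · rw [if_neg hL]
          exact pairwise_take_mono _ _ _ (by simp only [List.length_cons]; omega) hch

-- the whole bank loop, by induction along the bank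
theorem fold_main (n : Nat) (todo : List Int) : ∀ (p : Nat), p + todo.length = n →
    ∀ st : List Int, st.length ≤ 12 → (∀ x ∈ st, 0 ≤ x) →
      (st.take (st.length + (n - p) - 12)).Pairwise (· ≤ ·) →
      (∀ x ∈ todo, 0 ≤ x) →
      (PySem.List.enumerate todo (p : Int)).foldl
          (fun b pj => scanA (n : Int) pj.1 pj.2 0 b) (padA n p st) =
        padA n n ((PySem.List.enumerate todo (p : Int)).foldl (stepB (n : Int)) st) := by
  induction todo with
  | nil =>
    intro p hp st _ _ _ _
    simp only [PySem.List.enumerate_nil, List.foldl_nil]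
    have hpn : p = n := by simpa using hp
    rw [hpn]
  | cons d rest ih =>
    intro p hp st h1 h2 h3 h4
    rw [PySem.List.enumerate_cons, List.foldl_cons, List.foldl_cons]
    obtain ⟨heq, hl', hn', hc'⟩ :=
      step_main n p (by simp only [List.length_cons] at hp; omega) d (h4 d (by simp)) st h1 h2 h3
    have hcast : (p : Int) + 1 = ((p + 1 : Nat) : Int) := by push_cast; ring
    dsimp only
    rw [heq, hcast]
    exact ih (p + 1) (by simp only [List.length_cons] at hp; omega) _ hl' hn' hc'
      (fun x hx => h4 x (by simp [hx]))

theorem bank_eq (bank : List Int) (h : ∀ x ∈ bank, 0 ≤ x) : bankLoopA bank = bankLoopB bank := by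
  unfold bankLoopA bankLoopB
  have h0 : PySem.List.len bank = ((bank.length : Nat) : Int) := by
    simp [PySem.List.len_eq]
  have hpad0 : List.replicate 12 (0 : Int) = padA bank.length 0 [] := by
    unfold padA
    simp only [List.length_nil, List.reverse_nil, List.append_nil, List.nil_append, Nat.sub_zero]
    rw [← List.replicate_add]
    congr 1
    omega
  have hmain := fold_main bank.length bank 0 (by simp) [] (by simp) (by simp) (by simp) h
  simp only [Nat.cast_zero] at hmain
  rw [h0, hpad0, hmain]
  have hfin : ∀ stB : List Int, padA bank.length bank.length stB =
      List.replicate (12 - stB.length) 0 ++ stB.reverse := by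
    intro stB
    unfold padA
    rw [Nat.sub_self]
    simp only [Nat.sub_zero]
    rw [show 12 - (12 - stB.length) - stB.length = 0 from by omega]
    simp
  rw [hfin]

-- ===== VERDICT (by name: the statement is the Claim_ definition above) =====
theorem solve_spec : Claim_equal_solve := by
  intro input _ _
  unfold Spec_solve solve solve_alt
  rw [List.foldl_map]
  apply PySem.List.foldl_congr_mem
  intro acc line _
  have hB : transformB = transformA := rfl
  have hR : renderB = renderA := rfl
  have hnn : ∀ x ∈ transformA line, 0 ≤ x := by
    intro x hx
    unfold transformA at hx
    simp only [List.mem_map] at hx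
    obtain ⟨c, hc, rfl⟩ := hx
    exact pyIntA_nonneg c
  rw [hB, hR, bank_eq _ hnn]
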